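-- pv_equiv track=rewrite | github.com/mpgossage/advent2021 | day04.py | count_items_to_win
-- ===== SOURCE A (Python) =====
-- def count_items_to_win(nums, board):
--     "returns the number of 'nums' we need to get though for 'board' to win"
--     # a list of all possible ways to win
--     wins = []
--     for i in range(5):
--         w = set()
--         w2 = set()
--         for j in range(5):
--             w.add(board[i][j])
--             w2.add(board[j][i])
--         wins += [w, w2]
--     # each set is the list of items to win
--
--     # play game
--     for i in range(len(nums)):
--         n = nums[i]
--         # remove from each item
--         for w in wins:
--             w.discard(n)
--             if len(w) == 0:
--                 return i
-- ===== SOURCE B (Python) =====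
-- def count_items_to_win(nums, board):
--     "returns the number of 'nums' we need to get though for 'board' to win"
--     # position of each number's first draw
--     first = {}
--     for i, n in enumerate(nums):
--         if n not in first:
--             first[n] = i
--     # the 10 lines (5 rows, 5 columns)
--     lines = [[board[i][j] for j in range(5)] for i in range(5)] + \
--             [[board[j][i] for j in range(5)] for i in range(5)]
--     best = None
--     for line in lines:
--         if all(c in first for c in line):
--             done = max(first[c] for c in line)
--             if best is None or done < best:
--                 best = done
--     return best
-- ===== Notes on version B (the rewrite author's own statement) =====
-- stated objective: alternative
-- what changed: B replaces A's draw-by-draw simulation (discarding each drawn number from 10 mutable sets until one empties) with a direct computation: a first-occurrence index dict over nums, then for each of the 10 lines the completion draw is the max of its cells' first indices (skipping lines with an undrawn cell), and the answer is the minimum over lines.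
import Mathlib
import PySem

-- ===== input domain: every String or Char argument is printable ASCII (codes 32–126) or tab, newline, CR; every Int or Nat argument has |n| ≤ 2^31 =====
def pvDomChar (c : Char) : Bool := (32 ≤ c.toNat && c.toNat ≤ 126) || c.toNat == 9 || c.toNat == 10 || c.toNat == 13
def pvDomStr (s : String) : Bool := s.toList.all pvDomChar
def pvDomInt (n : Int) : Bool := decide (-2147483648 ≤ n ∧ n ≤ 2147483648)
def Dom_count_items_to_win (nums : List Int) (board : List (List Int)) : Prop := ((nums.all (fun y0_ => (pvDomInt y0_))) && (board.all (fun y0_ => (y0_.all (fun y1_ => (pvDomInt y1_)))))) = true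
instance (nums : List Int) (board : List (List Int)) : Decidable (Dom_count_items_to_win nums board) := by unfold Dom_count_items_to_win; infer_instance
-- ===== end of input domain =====

-- B replaces A's draw-by-draw simulation of the 10 bingo lines by a direct computation
-- (first-occurrence index of each number, then min over lines of the max index of their cells);
-- objective: alternative (same exact result, no speed claim).

-- board[i][j]; the default is never read on inputs admitted by Pre_count_items_to_win
def pvCell (board : List (List Int)) (i j : Int) : Int :=
  PySem.List.pyGetD (PySem.List.pyGetD board i []) j 0

-- ===== PORT A =====
-- the inner `for w in wins: w.discard(n); if len(w)==0: return i` loop: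
-- returns the (partially) updated list and whether it returned early
def pvDiscardLoop (n : Int) : List (PySem.Set Int) → (List (PySem.Set Int) × Bool)
  | [] => ([], false)
  | w :: ws =>
    let w' := PySem.Set.discard w n
    if PySem.Set.len w' = 0 then (w' :: ws, true)
    else
      let r := pvDiscardLoop n ws
      (w' :: r.1, r.2)

-- `for i in range(len(nums)): n = nums[i]; …`
def pvPlay : List Int → List (PySem.Set Int) → Int → Option Int
  | [], _, _ => none
  | n :: rest, wins, i =>
    let r := pvDiscardLoop n wins
    if r.2 then some i else pvPlay rest r.1 (i + 1)

-- `wins = []; for i in range(5): … ; wins += [w, w2]`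
def pvBuildWins (board : List (List Int)) : List (PySem.Set Int) :=
  (PySem.List.pyRange 0 5 1).foldl (fun wins i =>
    let w := (PySem.List.pyRange 0 5 1).foldl (fun s j => PySem.Set.add s (pvCell board i j)) PySem.Set.empty
    let w2 := (PySem.List.pyRange 0 5 1).foldl (fun s j => PySem.Set.add s (pvCell board j i)) PySem.Set.empty
    wins ++ [w, w2]) []

def count_items_to_win (nums : List Int) (board : List (List Int)) : Option Int :=
  pvPlay nums (pvBuildWins board) 0

-- ===== PORT B =====
-- `first = {}; for i, n in enumerate(nums): if n not in first: first[n] = i`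
def pvFirst (nums : List Int) : PySem.Dict Int Int :=
  (PySem.List.enumerate nums 0).foldl
    (fun d p => if d.contains p.2 then d else d.insert p.2 p.1) PySem.Dict.empty

-- the 10 lines: 5 rows then 5 columns
def pvLines (board : List (List Int)) : List (List Int) :=
  (PySem.List.pyRange 0 5 1).map (fun i => (PySem.List.pyRange 0 5 1).map (fun j => pvCell board i j)) ++
  (PySem.List.pyRange 0 5 1).map (fun i => (PySem.List.pyRange 0 5 1).map (fun j => pvCell board j i))

-- body of `for line in lines: …` (best-so-far accumulator);
-- the `none` branch of the match is unreachable (every line has 5 cells, so max(…) exists)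
def pvLineBest (first : PySem.Dict Int Int) (best : Option Int) (line : List Int) : Option Int :=
  if line.all (fun c => first.contains c) then
    match PySem.List.max? (line.map (fun c => first.getD c 0)) (fun x => x) with
    | some done =>
      match best with
      | none => some done
      | some b => if done < b then some done else some b
    | none => best
  else best

def count_items_to_win_alt (nums : List Int) (board : List (List Int)) : Option Int :=
  (pvLines board).foldl (pvLineBest (pvFirst nums)) none

-- ===== PRECONDITION & SPEC =====
-- Pre_ excludes exactly the inputs on which the Python A raises IndexError:
-- boards that do not have 5 rows each of length ≥ 5 (both programs index board[i][j] for all i, j < 5).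
def Pre_count_items_to_win (nums : List Int) (board : List (List Int)) : Prop :=
  5 ≤ board.length ∧ ∀ r ∈ board.take 5, 5 ≤ r.length
instance (nums : List Int) (board : List (List Int)) : Decidable (Pre_count_items_to_win nums board) := by
  unfold Pre_count_items_to_win; infer_instance

def pvWitness_count_items_to_win : List Int × List (List Int) :=
  ([3, 1, 2],
   [[1, 2, 3, 4, 5], [6, 7, 8, 9, 10], [11, 12, 13, 14, 15], [16, 17, 18, 19, 20], [21, 22, 23, 24, 25]])

def Spec_count_items_to_win (nums : List Int) (board : List (List Int)) (out : Option Int) : Prop := out = count_items_to_win_alt nums board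
instance (nums : List Int) (board : List (List Int)) (out : Option Int) : Decidable (Spec_count_items_to_win nums board out) := by unfold Spec_count_items_to_win; infer_instance

-- ===== CLAIM (what is proved, stated in full; the proofs are below) =====
def Claim_equal_count_items_to_win : Prop := ∀ (nums : List Int) (board : List (List Int)), Dom_count_items_to_win nums board → Pre_count_items_to_win nums board → Spec_count_items_to_win nums board (count_items_to_win nums board)

-- ===== LEMMAS AND PROOFS =====

-- minimum on Option Int (none = not achieved)
def pvOmin : Option Int → Option Int → Option Int
  | none, b => b
  | some a, none => some a
  | some a, some b => some (min a b)

-- none-absorbing maximum on Option Int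
def pvOmax : Option Int → Option Int → Option Int
  | some a, some b => some (max a b)
  | _, _ => none

-- index of the draw that completes the set w (A's semantics, recursively)
def pvDone : List Int → List Int → Option Int
  | _, [] => none
  | w, n :: rest =>
    if PySem.Set.discard w n = [] then some 0
    else (pvDone (PySem.Set.discard w n) rest).map (· + 1)

def pvMinOver (ws : List (List Int)) (nums : List Int) : Option Int :=
  ws.foldr (fun w acc => pvOmin (pvDone w nums) acc) none

-- first-occurrence index of c in nums (B's semantics, recursively)
def pvFIdx : List Int → Int → Option Int
  | [], _ => none
  | n :: rest, c => if c = n then some 0 else (pvFIdx rest c).map (· + 1)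

-- completion index of a set w via first-occurrence indices (base some 0 is sound: indices are ≥ 0)
def pvF (nums : List Int) (w : List Int) : Option Int :=
  w.foldr (fun c a => pvOmax (pvFIdx nums c) a) (some 0)

theorem pvF_nil (nums : List Int) : pvF nums [] = some 0 := rfl
theorem pvF_cons (nums : List Int) (c : Int) (t : List Int) :
    pvF nums (c :: t) = pvOmax (pvFIdx nums c) (pvF nums t) := rfl
theorem pvMinOver_cons (w : List Int) (t : List (List Int)) (nums : List Int) :
    pvMinOver (w :: t) nums = pvOmin (pvDone w nums) (pvMinOver t nums) := rfl

theorem pvOmin_none_left (b : Option Int) : pvOmin none b = b := rfl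

theorem pvOmin_none_right (a : Option Int) : pvOmin a none = a := by cases a <;> rfl

theorem pvOmin_comm (a b : Option Int) : pvOmin a b = pvOmin b a := by
  cases a <;> cases b <;> simp [pvOmin, min_comm]

theorem pvOmin_assoc (a b c : Option Int) : pvOmin (pvOmin a b) c = pvOmin a (pvOmin b c) := by
  cases a <;> cases b <;> cases c <;> simp [pvOmin, min_assoc]

theorem pvOmin_left_comm (a b c : Option Int) : pvOmin a (pvOmin b c) = pvOmin b (pvOmin a c) := by
  rw [← pvOmin_assoc, pvOmin_comm a b, pvOmin_assoc]

theorem pvOmax_map_succ (a b : Option Int) :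
    pvOmax (a.map (· + 1)) (b.map (· + 1)) = (pvOmax a b).map (· + 1) := by
  cases a <;> cases b <;> simp [pvOmax]

theorem pvOmin_map_succ (a b : Option Int) :
    pvOmin (a.map (· + 1)) (b.map (· + 1)) = (pvOmin a b).map (· + 1) := by
  cases a <;> cases b <;> simp [pvOmin]

theorem pvFIdx_nonneg (nums : List Int) (c : Int) (k : Int) (h : pvFIdx nums c = some k) : 0 ≤ k := by
  induction nums generalizing k with
  | nil => simp [pvFIdx] at h
  | cons n rest ih =>
    by_cases hc : c = n
    · simp [pvFIdx, hc] at h; omega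
    · simp [pvFIdx, hc] at h
      obtain ⟨j, hj, rfl⟩ := h
      have := ih j hj; omega

theorem pvF_nonneg (nums w : List Int) (k : Int) (h : pvF nums w = some k) : 0 ≤ k := by
  induction w generalizing k with
  | nil => rw [pvF_nil] at h; cases h; omega
  | cons c t ih =>
    rw [pvF_cons] at h
    cases hf : pvFIdx nums c <;> cases ht : pvF nums t <;>
      rw [hf, ht] at h <;> simp [pvOmax] at h
    have h1 := pvFIdx_nonneg nums c _ hf
    have h2 := ih _ ht
    omega

theorem pvDone_nonneg (nums : List Int) : ∀ (w : List Int) (k : Int), pvDone w nums = some k → 0 ≤ k := by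
  induction nums with
  | nil => intro w k h; simp [pvDone] at h
  | cons n rest ih =>
    intro w k h
    by_cases hd : PySem.Set.discard w n = []
    · simp [pvDone, hd] at h; omega
    · simp [pvDone, hd] at h
      obtain ⟨j, hj, rfl⟩ := h
      have := ih _ j hj; omega

-- ----- discard facts -----

theorem pvDiscard_cons (c : Int) (t : List Int) (n : Int) :
    PySem.Set.discard (c :: t) n = if c = n then PySem.Set.discard t n else c :: PySem.Set.discard t n := by
  by_cases hc : c = n <;> simp [PySem.Set.discard, hc]

theorem pvDiscard_not_mem (w : List Int) (n : Int) (h : n ∉ w) : PySem.Set.discard w n = w := by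
  induction w with
  | nil => rfl
  | cons c t ih =>
    simp at h
    rw [pvDiscard_cons]
    simp [Ne.symm h.1, ih h.2]

theorem pvDiscard_eq_nil (w : List Int) (n : Int) (hnd : w.Nodup) (hne : w ≠ [])
    (h : PySem.Set.discard w n = []) : w = [n] := by
  cases w with
  | nil => exact absurd rfl hne
  | cons c t =>
    rw [pvDiscard_cons] at h
    by_cases hc : c = n
    · subst hc
      rw [if_pos rfl] at h
      simp only [List.nodup_cons] at hnd
      rw [pvDiscard_not_mem t c hnd.1] at h
      rw [h]
    · rw [if_neg hc] at h
      simp at h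

-- ----- key lemma S: one draw peels off (+1) from pvF -----

theorem pvF_step (n : Int) (rest : List Int) :
    ∀ (w : List Int), w.Nodup → w ≠ [] → PySem.Set.discard w n ≠ [] →
      pvF (n :: rest) w = (pvF rest (PySem.Set.discard w n)).map (· + 1) := by
  intro w
  induction w with
  | nil => intro _ h; exact absurd rfl h
  | cons c t ih =>
    intro hnd _ hd
    simp [List.nodup_cons] at hnd
    have hFcons : ∀ (ns : List Int) (x : Int) (l : List Int),
        pvF ns (x :: l) = pvOmax (pvFIdx ns x) (pvF ns l) := by intro ns x l; rfl
    by_cases hc : c = n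
    · -- discard (n :: t) n = t (n ∉ t by Nodup)
      subst hc
      have hdt : PySem.Set.discard (c :: t) c = t := by
        rw [pvDiscard_cons]; simp [pvDiscard_not_mem t c hnd.1]
      rw [hdt] at hd ⊢
      have hdisc_t : PySem.Set.discard t c = t := pvDiscard_not_mem t c hnd.1
      have hT : pvF (c :: rest) t = (pvF rest t).map (· + 1) := by
        have := ih hnd.2 hd (by rw [hdisc_t]; exact hd)
        rwa [hdisc_t] at this
      rw [hFcons, hT]
      have : pvFIdx (c :: rest) c = some 0 := by simp [pvFIdx]
      rw [this]
      cases hft : pvF rest t with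
      | none => simp [pvOmax]
      | some k =>
        have hk := pvF_nonneg rest t k hft
        simp [pvOmax]
        omega
    · -- discard (c :: t) n = c :: discard t n
      have hdc : PySem.Set.discard (c :: t) n = c :: PySem.Set.discard t n := by
        rw [pvDiscard_cons]; simp [hc]
      rw [hdc]
      have hfc : pvFIdx (n :: rest) c = (pvFIdx rest c).map (· + 1) := by simp [pvFIdx, hc]
      rw [hFcons, hFcons, hfc]
      by_cases ht : t = []
      · subst ht
        show pvOmax ((pvFIdx rest c).map (· + 1)) (pvF (n :: rest) []) =
          (pvOmax (pvFIdx rest c) (pvF rest (PySem.Set.discard [] n))).map (· + 1)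
        cases hfr : pvFIdx rest c with
        | none => simp [pvOmax, pvF]
        | some k =>
          have hk := pvFIdx_nonneg rest c k hfr
          simp [pvOmax, pvF, PySem.Set.discard]
          omega
      · by_cases hdt : PySem.Set.discard t n = []
        · -- t = [n]
          have htn : t = [n] := pvDiscard_eq_nil t n hnd.2 ht hdt
          subst htn
          rw [hdt]
          have h1 : pvF (n :: rest) [n] = some 0 := by
            simp [pvF, pvFIdx, pvOmax]
          rw [h1]
          cases hfr : pvFIdx rest c with
          | none => simp [pvOmax, pvF]
          | some k =>
            have hk := pvFIdx_nonneg rest c k hfr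
            simp [pvOmax, pvF]
            omega
        · have hT := ih hnd.2 ht hdt
          rw [hT, pvOmax_map_succ]

-- ----- lemma M: pvDone = pvF on nonempty duplicate-free sets -----

theorem pvDone_eq_pvF (nums : List Int) :
    ∀ (w : List Int), w.Nodup → w ≠ [] → pvDone w nums = pvF nums w := by
  induction nums with
  | nil =>
    intro w _ hne
    cases w with
    | nil => exact absurd rfl hne
    | cons c t => simp [pvDone, pvF, pvFIdx, pvOmax]
  | cons n rest ih =>
    intro w hnd hne
    by_cases hd : PySem.Set.discard w n = []
    · have hw : w = [n] := pvDiscard_eq_nil w n hnd hne hd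
      subst hw
      simp [pvDone, hd, pvF, pvFIdx, pvOmax]
    · have hdn : (PySem.Set.discard w n).Nodup := PySem.Set.nodup_discard w n hnd
      have : pvDone w (n :: rest) = (pvDone (PySem.Set.discard w n) rest).map (· + 1) := by
        simp [pvDone, hd]
      rw [this, ih _ hdn hd, ← pvF_step n rest w hnd hne hd]

-- ----- A-side: the play loop computes the minimum completion index -----

theorem pvDiscardLoop_snd (n : Int) (ws : List (PySem.Set Int)) :
    (pvDiscardLoop n ws).2 = true ↔ ∃ w ∈ ws, PySem.Set.discard w n = [] := by
  induction ws with
  | nil => simp [pvDiscardLoop]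
  | cons w t ih =>
    by_cases h : PySem.Set.len (PySem.Set.discard w n) = 0
    · have : PySem.Set.discard w n = [] := by
        simpa [PySem.Set.len, List.length_eq_zero_iff] using h
      simp [pvDiscardLoop, this]
    · have hne : PySem.Set.discard w n ≠ [] := by
        intro hc; apply h; simp [PySem.Set.len, hc]
      simp [pvDiscardLoop, ih, hne]

theorem pvDiscardLoop_fst (n : Int) (ws : List (PySem.Set Int))
    (h : (pvDiscardLoop n ws).2 = false) :
    (pvDiscardLoop n ws).1 = ws.map (fun w => PySem.Set.discard w n) := by
  induction ws with
  | nil => rfl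
  | cons w t ih =>
    by_cases hd : PySem.Set.discard w n = []
    · simp [pvDiscardLoop, hd, PySem.Set.len] at h
    · have hl : ¬ PySem.Set.len (PySem.Set.discard w n) = 0 := by
        simp [PySem.Set.len, hd]
      simp only [pvDiscardLoop, if_neg hl] at h ⊢
      simp only [List.map]
      rw [ih h]

theorem pvMinOver_nil (ws : List (List Int)) : pvMinOver ws [] = none := by
  induction ws with
  | nil => rfl
  | cons w t ih => rw [pvMinOver_cons, ih, pvOmin_none_right]; rfl

theorem pvMinOver_nonneg (ws : List (List Int)) (nums : List Int) (k : Int)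
    (h : pvMinOver ws nums = some k) : 0 ≤ k := by
  induction ws generalizing k with
  | nil => simp [pvMinOver] at h
  | cons w t ih =>
    rw [pvMinOver_cons] at h
    cases hd : pvDone w nums with
    | none =>
      rw [hd, pvOmin_none_left] at h
      exact ih _ h
    | some a =>
      cases ht : pvMinOver t nums with
      | none =>
        rw [hd, ht, pvOmin_none_right] at h
        cases h
        exact pvDone_nonneg nums w _ hd
      | some b =>
        rw [hd, ht] at h
        simp [pvOmin] at h
        have h1 := pvDone_nonneg nums w _ hd
        have h2 := ih _ ht
        omega

theorem pvMinOver_zero (ws : List (List Int)) (nums : List Int)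
    (h : ∃ w ∈ ws, pvDone w nums = some 0) : pvMinOver ws nums = some 0 := by
  induction ws with
  | nil => simp at h
  | cons w t ih =>
    rw [pvMinOver_cons]
    rcases h with ⟨w', hw', hz⟩
    rcases List.mem_cons.1 hw' with rfl | hmem
    · rw [hz]
      cases ht : pvMinOver t nums with
      | none => rfl
      | some k =>
        have hk := pvMinOver_nonneg t nums k ht
        simp [pvOmin]; omega
    · rw [ih ⟨w', hmem, hz⟩]
      cases hd : pvDone w nums with
      | none => rfl
      | some k =>
        have hk := pvDone_nonneg nums w _ hd
        simp [pvOmin]; omega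

theorem pvMinOver_step (ws : List (List Int)) (n : Int) (rest : List Int)
    (h : ∀ w ∈ ws, PySem.Set.discard w n ≠ []) :
    pvMinOver ws (n :: rest) = (pvMinOver (ws.map (fun w => PySem.Set.discard w n)) rest).map (· + 1) := by
  induction ws with
  | nil => simp [pvMinOver]
  | cons w t ih =>
    simp only [pvMinOver, List.foldr, List.map] at ih ⊢
    have hw := h w (by simp)
    have hstep : pvDone w (n :: rest) = (pvDone (PySem.Set.discard w n) rest).map (· + 1) := by
      simp [pvDone, hw]
    rw [hstep, ih (fun w hw => h w (by simp [hw])), pvOmin_map_succ]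

theorem pvPlay_eq (nums : List Int) :
    ∀ (ws : List (PySem.Set Int)) (i : Int),
      pvPlay nums ws i = (pvMinOver ws nums).map (fun k => i + k) := by
  induction nums with
  | nil => intro ws i; simp [pvPlay, pvMinOver_nil]
  | cons n rest ih =>
    intro ws i
    by_cases hhit : ∃ w ∈ ws, PySem.Set.discard w n = []
    · have h2 : (pvDiscardLoop n ws).2 = true := (pvDiscardLoop_snd n ws).2 hhit
      have hz : pvMinOver ws (n :: rest) = some 0 := by
        apply pvMinOver_zero
        rcases hhit with ⟨w, hw, hd⟩
        exact ⟨w, hw, by simp [pvDone, hd]⟩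
      simp [pvPlay, h2, hz]
    · have h2 : (pvDiscardLoop n ws).2 = false := by
        cases hb : (pvDiscardLoop n ws).2
        · rfl
        · exact absurd ((pvDiscardLoop_snd n ws).1 hb) hhit
      simp only [not_exists, not_and] at hhit
      have h1 := pvDiscardLoop_fst n ws h2
      rw [pvMinOver_step ws n rest hhit]
      simp only [pvPlay, h2, if_false, Bool.false_eq_true]
      rw [h1, ih]
      cases pvMinOver (ws.map (fun w => PySem.Set.discard w n)) rest with
      | none => rfl
      | some k => simp; omega

-- ----- B-side: the dict holds the first-occurrence indices -----

theorem pvFirst_fold_get? (c : Int) (nums : List Int) :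
    ∀ (s : Int) (d : PySem.Dict Int Int),
      ((PySem.List.enumerate nums s).foldl
          (fun d p => if d.contains p.2 then d else d.insert p.2 p.1) d).get? c
        = if d.contains c then d.get? c else (pvFIdx nums c).map (· + s) := by
  induction nums with
  | nil =>
    intro s d
    by_cases h : d.contains c = true
    · simp [PySem.List.enumerate, h]
    · have hb : d.contains c = false := by simpa using h
      have hnone : d.get? c = none := by
        have hcs := PySem.Dict.contains_eq_isSome_get? d c
        rw [hb] at hcs
        cases hg : d.get? c with
        | none => rfl
        | some v => rw [hg] at hcs; simp at hcs
      simp [PySem.List.enumerate, hb, pvFIdx, hnone]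
  | cons n rest ih =>
    intro s d
    rw [PySem.List.enumerate_cons]
    simp only [List.foldl]
    by_cases hcn : d.contains n = true
    · rw [if_pos hcn, ih (s + 1) d]
      by_cases hcc : d.contains c = true
      · simp [hcc]
      · have hb : d.contains c = false := by simpa using hcc
        have hne : c ≠ n := by intro h; rw [h] at hb; rw [hb] at hcn; exact absurd hcn (by simp)
        rw [if_neg (by simp [hb]), if_neg (by simp [hb])]
        simp [pvFIdx, hne, Option.map_map]
        congr 1; funext k; omega
    · have hcnb : d.contains n = false := by simpa using hcn
      rw [if_neg (by simp [hcnb]), ih (s + 1) (d.insert n s)]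
      by_cases hce : c = n
      · subst hce
        rw [if_pos (by simp), if_neg (by simp [hcnb])]
        rw [PySem.Dict.get?_insert_self]
        simp [pvFIdx]
      · rw [PySem.Dict.contains_insert, PySem.Dict.get?_insert_of_ne d s hce]
        have hbeq : (c == n) = false := by simpa using hce
        rw [hbeq]
        simp only [Bool.false_or]
        by_cases hcc : d.contains c = true
        · simp [hcc]
        · have hb : d.contains c = false := by simpa using hcc
          rw [if_neg (by simp [hb]), if_neg (by simp [hb])]
          simp [pvFIdx, hce, Option.map_map]
          congr 1; funext k; omega

theorem pvFirst_get? (nums : List Int) (c : Int) :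
    (pvFirst nums).get? c = pvFIdx nums c := by
  unfold pvFirst
  rw [pvFirst_fold_get? c nums 0 PySem.Dict.empty]
  simp [PySem.Dict.contains_empty]

theorem pvFirst_contains (nums : List Int) (c : Int) :
    (pvFirst nums).contains c = (pvFIdx nums c).isSome := by
  rw [PySem.Dict.contains_eq_isSome_get?, pvFirst_get?]

theorem pvFirst_getD (nums : List Int) (c : Int) :
    (pvFirst nums).getD c 0 = (pvFIdx nums c).getD 0 := by
  rw [PySem.Dict.getD_eq_get?_getD, pvFirst_get?]

-- ----- pvF as a maximum -----

theorem pvF_none_of_mem (nums : List Int) (w : List Int) (c : Int) (hc : c ∈ w)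
    (h : pvFIdx nums c = none) : pvF nums w = none := by
  induction w with
  | nil => simp at hc
  | cons x t ih =>
    have hF : pvF nums (x :: t) = pvOmax (pvFIdx nums x) (pvF nums t) := rfl
    rcases List.mem_cons.1 hc with rfl | hm
    · rw [hF, h]; rfl
    · rw [hF, ih hm]
      cases pvFIdx nums x <;> rfl

theorem pvF_isSome (nums : List Int) (w : List Int)
    (h : ∀ c ∈ w, (pvFIdx nums c).isSome) : (pvF nums w).isSome := by
  induction w with
  | nil => simp [pvF]
  | cons x t ih =>
    have hF : pvF nums (x :: t) = pvOmax (pvFIdx nums x) (pvF nums t) := rfl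
    rw [hF]
    have h1 := h x (by simp)
    have h2 := ih (fun c hc => h c (by simp [hc]))
    cases hx : pvFIdx nums x <;> cases ht : pvF nums t <;>
      simp [hx, ht] at h1 h2 <;> simp [pvOmax]

theorem pvF_isMax (nums : List Int) (w : List Int) (M : Int) (h : pvF nums w = some M) :
    ∀ c ∈ w, (pvFIdx nums c).getD 0 ≤ M := by
  induction w generalizing M with
  | nil => simp
  | cons x t ih =>
    rw [pvF_cons] at h
    intro c hc
    cases hx : pvFIdx nums x with
    | none => rw [hx] at h; cases pvF nums t <;> simp [pvOmax] at h
    | some kx =>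
      cases ht : pvF nums t with
      | none => rw [hx, ht] at h; simp [pvOmax] at h
      | some kt =>
        rw [hx, ht] at h
        simp only [pvOmax, Option.some.injEq] at h
        rcases List.mem_cons.1 hc with rfl | hm
        · rw [hx]; simp only [Option.getD_some]; omega
        · have := ih kt ht c hm; omega

theorem pvF_mem (nums : List Int) (w : List Int) (M : Int) (hne : w ≠ [])
    (h : pvF nums w = some M) : ∃ c ∈ w, (pvFIdx nums c).getD 0 = M := by
  induction w generalizing M with
  | nil => exact absurd rfl hne
  | cons x t ih =>
    rw [pvF_cons] at h
    cases hx : pvFIdx nums x with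
    | none => rw [hx] at h; cases pvF nums t <;> simp [pvOmax] at h
    | some kx =>
      cases ht : pvF nums t with
      | none => rw [hx, ht] at h; simp [pvOmax] at h
      | some kt =>
        rw [hx, ht] at h
        simp only [pvOmax, Option.some.injEq] at h
        by_cases hcmp : kt ≤ kx
        · refine ⟨x, by simp, ?_⟩
          rw [hx]
          simp only [Option.getD_some]
          omega
        · cases t with
          | nil =>
            have hkx := pvFIdx_nonneg nums x kx hx
            rw [pvF_nil] at ht
            cases ht
            omega
          | cons y u =>
            obtain ⟨c, hc, hval⟩ := ih kt (by simp) ht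
            refine ⟨c, by simp [hc], ?_⟩
            rw [hval]
            omega

-- ----- lemma Bl: one line of B's loop is pvOmin with pvF of the line's set -----

theorem pvLineBest_eq (nums : List Int) (best : Option Int) (line : List Int) (hne : line ≠ []) :
    pvLineBest (pvFirst nums) best line = pvOmin best (pvF nums (PySem.Set.ofList line)) := by
  unfold pvLineBest
  by_cases hall : line.all (fun c => (pvFirst nums).contains c) = true
  · -- every cell was drawn
    rw [if_pos hall]
    have hsome : ∀ c ∈ PySem.Set.ofList line, (pvFIdx nums c).isSome := by
      intro c hc
      have hcl : c ∈ line := (PySem.Set.mem_ofList line c).1 hc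
      have := (List.all_eq_true.1 hall) c hcl
      rwa [pvFirst_contains] at this
    obtain ⟨M, hM⟩ := Option.isSome_iff_exists.1
      (pvF_isSome nums (PySem.Set.ofList line) hsome)
    have hofne : PySem.Set.ofList line ≠ [] := by
      cases line with
      | nil => exact absurd rfl hne
      | cons x t =>
        intro hcon
        have : x ∈ PySem.Set.ofList (x :: t) := (PySem.Set.mem_ofList _ x).2 (by simp)
        rw [hcon] at this; simp at this
    -- the mapped list is nonempty, so max? is some
    have hmapne : line.map (fun c => (pvFirst nums).getD c 0) ≠ [] := by
      simpa using hne
    cases hmax : PySem.List.max? (line.map (fun c => (pvFirst nums).getD c 0)) (fun x => x) with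
    | none => exact absurd ((PySem.List.max?_eq_none_iff _ _).1 hmax) hmapne
    | some done =>
      -- done = M by antisymmetry
      have hdone_mem := PySem.List.max?_mem hmax
      have hdone_max := PySem.List.max?_isMax hmax
      obtain ⟨c0, hc0, hc0v⟩ := List.mem_map.1 hdone_mem
      have hdone_leM : done ≤ M := by
        rw [← hc0v, pvFirst_getD]
        exact pvF_isMax nums _ M hM c0 ((PySem.Set.mem_ofList line c0).2 hc0)
      have hM_le : M ≤ done := by
        obtain ⟨c1, hc1, hc1v⟩ := pvF_mem nums _ M hofne hM
        have hc1l : c1 ∈ line := (PySem.Set.mem_ofList line c1).1 hc1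
        have := hdone_max ((pvFirst nums).getD c1 0) (List.mem_map.2 ⟨c1, hc1l, rfl⟩)
        rw [pvFirst_getD, hc1v] at this
        simpa using this
      have hdM : done = M := le_antisymm hdone_leM hM_le
      subst hdM
      rw [hM]
      cases best with
      | none => rfl
      | some b =>
        show (if done < b then some done else some b) = pvOmin (some b) (some done)
        simp only [pvOmin]
        by_cases hlt : done < b
        · rw [if_pos hlt, min_eq_right (le_of_lt hlt)]
        · rw [if_neg hlt, min_eq_left (by omega)]
  · -- some cell was never drawn: the line never completes
    have hex : ∃ c ∈ line, (pvFirst nums).contains c = false := by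
      by_contra hco
      apply hall
      simp only [List.all_eq_true]
      intro c hc
      by_cases h2 : (pvFirst nums).contains c = true
      · exact h2
      · exact absurd ⟨c, hc, by simpa using h2⟩ hco
    obtain ⟨c, hc, hcf⟩ := hex
    have hnone : pvFIdx nums c = none := by
      rw [pvFirst_contains] at hcf
      cases hfi : pvFIdx nums c with
      | none => rfl
      | some k => rw [hfi] at hcf; simp at hcf
    have hFnone : pvF nums (PySem.Set.ofList line) = none :=
      pvF_none_of_mem nums _ c ((PySem.Set.mem_ofList line c).2 hc) hnone
    rw [if_neg hall, hFnone, pvOmin_none_right]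

-- ----- assembling the 10 lines -----

-- the literal row and column cell lists
def pvRowL (board : List (List Int)) (i : Int) : List Int :=
  [pvCell board i 0, pvCell board i 1, pvCell board i 2, pvCell board i 3, pvCell board i 4]
def pvColL (board : List (List Int)) (i : Int) : List Int :=
  [pvCell board 0 i, pvCell board 1 i, pvCell board 2 i, pvCell board 3 i, pvCell board 4 i]

theorem pvBuildWins_eq (board : List (List Int)) :
    pvBuildWins board =
      [PySem.Set.ofList (pvRowL board 0), PySem.Set.ofList (pvColL board 0),
       PySem.Set.ofList (pvRowL board 1), PySem.Set.ofList (pvColL board 1),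
       PySem.Set.ofList (pvRowL board 2), PySem.Set.ofList (pvColL board 2),
       PySem.Set.ofList (pvRowL board 3), PySem.Set.ofList (pvColL board 3),
       PySem.Set.ofList (pvRowL board 4), PySem.Set.ofList (pvColL board 4)] := rfl

theorem pvLines_eq (board : List (List Int)) :
    pvLines board =
      [pvRowL board 0, pvRowL board 1, pvRowL board 2, pvRowL board 3, pvRowL board 4,
       pvColL board 0, pvColL board 1, pvColL board 2, pvColL board 3, pvColL board 4] := rfl

theorem pvFoldlLineBest (nums : List Int) :
    ∀ (ls : List (List Int)), (∀ l ∈ ls, l ≠ []) → ∀ (best : Option Int),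
      ls.foldl (pvLineBest (pvFirst nums)) best
        = pvOmin best (ls.foldr (fun l acc => pvOmin (pvF nums (PySem.Set.ofList l)) acc) none) := by
  intro ls
  induction ls with
  | nil => intro _ best; simp [pvOmin_none_right]
  | cons l t ih =>
    intro h best
    simp only [List.foldl, List.foldr]
    rw [ih (fun l hl => h l (by simp [hl])), pvLineBest_eq nums best l (h l (by simp)),
        pvOmin_assoc]

theorem pvChain10 (a0 a1 a2 a3 a4 b0 b1 b2 b3 b4 : Option Int) :
    pvOmin a0 (pvOmin b0 (pvOmin a1 (pvOmin b1 (pvOmin a2 (pvOmin b2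
      (pvOmin a3 (pvOmin b3 (pvOmin a4 (pvOmin b4 none))))))))) =
    pvOmin a0 (pvOmin a1 (pvOmin a2 (pvOmin a3 (pvOmin a4 (pvOmin b0
      (pvOmin b1 (pvOmin b2 (pvOmin b3 (pvOmin b4 none))))))))) := by
  rw [pvOmin_left_comm b0 a1, pvOmin_left_comm b1 a2, pvOmin_left_comm b0 a2,
      pvOmin_left_comm b2 a3, pvOmin_left_comm b1 a3, pvOmin_left_comm b0 a3,
      pvOmin_left_comm b3 a4, pvOmin_left_comm b2 a4, pvOmin_left_comm b1 a4,
      pvOmin_left_comm b0 a4]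

theorem pvRowL_ne_nil (board : List (List Int)) (i : Int) : pvRowL board i ≠ [] := by
  simp [pvRowL]
theorem pvColL_ne_nil (board : List (List Int)) (i : Int) : pvColL board i ≠ [] := by
  simp [pvColL]

theorem pvOfList_ne_nil (l : List Int) (h : l ≠ []) : PySem.Set.ofList l ≠ [] := by
  cases l with
  | nil => exact absurd rfl h
  | cons x t =>
    intro hcon
    have : x ∈ PySem.Set.ofList (x :: t) := (PySem.Set.mem_ofList _ x).2 (by simp)
    rw [hcon] at this; simp at this

theorem pv_main (nums : List Int) (board : List (List Int)) :
    count_items_to_win nums board = count_items_to_win_alt nums board := by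
  have hdone : ∀ (l : List Int), l ≠ [] →
      pvDone (PySem.Set.ofList l) nums = pvF nums (PySem.Set.ofList l) :=
    fun l hl => pvDone_eq_pvF nums _ (PySem.Set.nodup_ofList l) (pvOfList_ne_nil l hl)
  -- A side: play loop = min over the 10 interleaved lines of their completion index
  have hA : count_items_to_win nums board =
      pvOmin (pvF nums (PySem.Set.ofList (pvRowL board 0)))
        (pvOmin (pvF nums (PySem.Set.ofList (pvColL board 0)))
        (pvOmin (pvF nums (PySem.Set.ofList (pvRowL board 1)))
        (pvOmin (pvF nums (PySem.Set.ofList (pvColL board 1)))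
        (pvOmin (pvF nums (PySem.Set.ofList (pvRowL board 2)))
        (pvOmin (pvF nums (PySem.Set.ofList (pvColL board 2)))
        (pvOmin (pvF nums (PySem.Set.ofList (pvRowL board 3)))
        (pvOmin (pvF nums (PySem.Set.ofList (pvColL board 3)))
        (pvOmin (pvF nums (PySem.Set.ofList (pvRowL board 4)))
        (pvOmin (pvF nums (PySem.Set.ofList (pvColL board 4))) none))))))))) := by
    show pvPlay nums (pvBuildWins board) 0 = _
    rw [pvPlay_eq, pvBuildWins_eq]
    simp only [pvMinOver, List.foldr]
    rw [hdone _ (pvRowL_ne_nil board 0), hdone _ (pvColL_ne_nil board 0),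
        hdone _ (pvRowL_ne_nil board 1), hdone _ (pvColL_ne_nil board 1),
        hdone _ (pvRowL_ne_nil board 2), hdone _ (pvColL_ne_nil board 2),
        hdone _ (pvRowL_ne_nil board 3), hdone _ (pvColL_ne_nil board 3),
        hdone _ (pvRowL_ne_nil board 4), hdone _ (pvColL_ne_nil board 4)]
    cases pvOmin (pvF nums (PySem.Set.ofList (pvRowL board 0))) _ <;> simp
  -- B side: the best-so-far loop = min over the 10 grouped lines
  have hB : count_items_to_win_alt nums board =
      pvOmin (pvF nums (PySem.Set.ofList (pvRowL board 0)))
        (pvOmin (pvF nums (PySem.Set.ofList (pvRowL board 1)))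
        (pvOmin (pvF nums (PySem.Set.ofList (pvRowL board 2)))
        (pvOmin (pvF nums (PySem.Set.ofList (pvRowL board 3)))
        (pvOmin (pvF nums (PySem.Set.ofList (pvRowL board 4)))
        (pvOmin (pvF nums (PySem.Set.ofList (pvColL board 0)))
        (pvOmin (pvF nums (PySem.Set.ofList (pvColL board 1)))
        (pvOmin (pvF nums (PySem.Set.ofList (pvColL board 2)))
        (pvOmin (pvF nums (PySem.Set.ofList (pvColL board 3)))
        (pvOmin (pvF nums (PySem.Set.ofList (pvColL board 4))) none))))))))) := by
    show (pvLines board).foldl (pvLineBest (pvFirst nums)) none = _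
    rw [pvLines_eq]
    rw [pvFoldlLineBest nums _ (by
      intro l hl
      simp only [List.mem_cons, List.not_mem_nil, or_false] at hl
      rcases hl with rfl|rfl|rfl|rfl|rfl|rfl|rfl|rfl|rfl|rfl
      · exact pvRowL_ne_nil board 0
      · exact pvRowL_ne_nil board 1
      · exact pvRowL_ne_nil board 2
      · exact pvRowL_ne_nil board 3
      · exact pvRowL_ne_nil board 4
      · exact pvColL_ne_nil board 0
      · exact pvColL_ne_nil board 1
      · exact pvColL_ne_nil board 2
      · exact pvColL_ne_nil board 3
      · exact pvColL_ne_nil board 4) none]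
    simp only [List.foldr]
    rw [pvOmin_none_left]
  rw [hA, hB, pvChain10]

-- ===== VERDICT (by name: the statement is the Claim_ definition above) =====
theorem count_items_to_win_spec : Claim_equal_count_items_to_win := by
  intro nums board _ _
  unfold Spec_count_items_to_win
  exact pv_main nums board
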